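-- pv_equiv track=rewrite | github.com/lorselq/enochian_language_modeling | src/enochian_translation_team/tools/debate_engine.py | select_definitions
-- ===== SOURCE A (Python) =====
-- def select_definitions(def_list, max_words=75):
--     selected = []
--     total_words = 0
--
--     for d in def_list:
--         # Only count words before the first citation bracket
--         bracket_index = d.find(" [")
--         if bracket_index != -1:
--             word_slice = d[:bracket_index]
--         else:
--             word_slice = d
--         word_count = len(word_slice.split())
--
--         if total_words + word_count > max_words:
--             break
--
--         selected.append(d)
--         total_words += word_count
--
--     return selected
-- ===== SOURCE B (Python) =====
-- def _pre_bracket_word_count(d):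
--     i = d.find(" [")
--     core = d[:i] if i != -1 else d
--     return len(core.split())
--
--
-- def select_definitions(def_list, max_words=75):
--     counts = [_pre_bracket_word_count(d) for d in def_list]
--     totals = []
--     running = 0
--     for c in counts:
--         running += c
--         totals.append(running)
--     cutoff = len(def_list)
--     for i, t in enumerate(totals):
--         if t > max_words:
--             cutoff = i
--             break
--     return def_list[:cutoff]
-- ===== Notes on version B (the rewrite author's own statement) =====
-- stated objective: alternative
-- what changed: Replaced the single break-on-overflow accumulator loop by three separate passes: a full per-definition word-count table, a cumulative-totals list, and a first-overflow index search followed by one list slice (valid since counts are non-negative).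
import Mathlib
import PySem

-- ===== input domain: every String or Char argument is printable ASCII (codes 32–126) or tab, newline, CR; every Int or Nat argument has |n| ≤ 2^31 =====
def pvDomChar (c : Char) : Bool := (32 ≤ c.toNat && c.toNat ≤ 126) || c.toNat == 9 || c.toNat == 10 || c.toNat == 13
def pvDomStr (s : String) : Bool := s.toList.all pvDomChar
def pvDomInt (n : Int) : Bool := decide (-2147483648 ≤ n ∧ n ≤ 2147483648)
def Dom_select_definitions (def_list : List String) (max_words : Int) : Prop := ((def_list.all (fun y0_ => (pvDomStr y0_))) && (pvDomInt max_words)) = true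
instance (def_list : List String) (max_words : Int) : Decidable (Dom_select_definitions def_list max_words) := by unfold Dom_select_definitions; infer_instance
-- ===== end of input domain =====

-- B replaces A's break-on-overflow accumulator loop by separate passes: a word-count table,
-- cumulative totals, a first-overflow index search, then one list slice (alternative decomposition).


-- ===== PORT A =====
-- the for-loop with break: structural recursion over the list with (total_words, selected) state
def selGoA (max_words : Int) : List String → Int → List String → List String
  | [], _, selected => selected
  | d :: rest, total_words, selected =>
    let bracket_index := PySem.Str.find d " ["
    let word_slice := if bracket_index ≠ -1 then PySem.Str.slice d none (some bracket_index) else d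
    let word_count : Int := ((PySem.Str.split₀ word_slice).length : Int)
    if max_words < total_words + word_count then selected
    else selGoA max_words rest (total_words + word_count) (selected ++ [d])

def select_definitions (def_list : List String) (max_words : Int) : List String :=
  selGoA max_words def_list 0 []

-- ===== PORT B =====
-- helper: _pre_bracket_word_count
def preBracketWordCount (d : String) : Int :=
  let i := PySem.Str.find d " ["
  let core := if i ≠ -1 then PySem.Str.slice d none (some i) else d
  ((PySem.Str.split₀ core).length : Int)

def select_definitions_alt (def_list : List String) (max_words : Int) : List String :=
  let counts := def_list.map preBracketWordCount
  let totals := (counts.foldl (fun acc c => (acc.1 + c, acc.2 ++ [acc.1 + c])) ((0 : Int), ([] : List Int))).2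
  let cutoff := match totals.findIdx? (fun t => decide (max_words < t)) with
    | some i => i
    | none => def_list.length
  def_list.take cutoff

-- ===== PRECONDITION & SPEC =====
def Spec_select_definitions (def_list : List String) (max_words : Int) (out : List String) : Prop := out = select_definitions_alt def_list max_words
instance (def_list : List String) (max_words : Int) (out : List String) : Decidable (Spec_select_definitions def_list max_words out) := by unfold Spec_select_definitions; infer_instance

-- ===== CLAIM (what is proved, stated in full; the proofs are below) =====
def Claim_equal_select_definitions : Prop := ∀ (def_list : List String) (max_words : Int), Dom_select_definitions def_list max_words → Spec_select_definitions def_list max_words (select_definitions def_list max_words)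

-- ===== LEMMAS AND PROOFS =====

-- common simple recursion both sides are reduced to
def simpleSel (mw : Int) : List String → Int → List String
  | [], _ => []
  | d :: r, t =>
    if mw < t + preBracketWordCount d then []
    else d :: simpleSel mw r (t + preBracketWordCount d)

theorem selGoA_eq (mw : Int) (l : List String) : ∀ (t : Int) (sel : List String),
    selGoA mw l t sel = sel ++ simpleSel mw l t := by
  induction l with
  | nil => intro t sel; simp [selGoA, simpleSel]
  | cons d r ih =>
    intro t sel
    simp only [selGoA, simpleSel, preBracketWordCount]
    split_ifs
    all_goals simp [ih]

-- running prefix sums starting from t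
def prefSums : Int → List Int → List Int
  | _, [] => []
  | t, c :: cs => (t + c) :: prefSums (t + c) cs

theorem foldl_pair_eq (cs : List Int) : ∀ (t : Int) (acc : List Int),
    (cs.foldl (fun acc c => (acc.1 + c, acc.2 ++ [acc.1 + c])) (t, acc)).2 = acc ++ prefSums t cs := by
  induction cs with
  | nil => intro t acc; simp [prefSums]
  | cons c cs ih => intro t acc; simp [prefSums, List.foldl_cons, ih]

set_option maxRecDepth 4096 in
theorem take_cutoff_eq (mw : Int) (l : List String) : ∀ (t : Int),
    l.take (match (prefSums t (l.map preBracketWordCount)).findIdx? (fun x => decide (mw < x)) with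
      | some i => i
      | none => l.length) = simpleSel mw l t := by
  induction l with
  | nil => intro t; simp [prefSums, simpleSel]
  | cons d r ih =>
    intro t
    simp only [List.map_cons, prefSums, simpleSel, List.findIdx?_cons]
    by_cases h : mw < t + preBracketWordCount d
    · simp [h]
    · cases hf : (prefSums (t + preBracketWordCount d) (r.map preBracketWordCount)).findIdx?
          (fun x => decide (mw < x)) with
      | none =>
        have hh := ih (t + preBracketWordCount d)
        rw [hf] at hh
        simp at hh
        simp [h, ← hh]
      | some j =>
        have hh := ih (t + preBracketWordCount d)
        rw [hf] at hh
        simp at hh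
        simp [h, hh]

-- ===== VERDICT (by name: the statement is the Claim_ definition above) =====
theorem select_definitions_spec : Claim_equal_select_definitions := by
  intro def_list max_words _
  unfold Spec_select_definitions select_definitions select_definitions_alt
  rw [selGoA_eq]
  simp only [foldl_pair_eq, List.nil_append]
  exact (take_cutoff_eq max_words def_list 0).symm
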